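-- pv_equiv track=rewrite | github.com/LikeBear95/Algorithm | 프로그래머스/unrated/181834. l로 만들기/l로 만들기.py | solution
-- ===== SOURCE A (Python) =====
-- def solution(myString):
--     answer = ''
--     for string in myString:
--         if string in 'abcdefghijk':
--             answer += 'l'
--         else:
--             answer += string
--     return answer
-- ===== SOURCE B (Python) =====
-- def solution(myString):
--     # staged whole-string passes: one str.replace per target letter;
--     # safe because the replacement 'l' is never itself a target letter
--     for c in 'abcdefghijk':
--         myString = myString.replace(c, 'l')
--     return myString
-- ===== Notes on version B (the rewrite author's own statement) =====
-- stated objective: alternative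
-- what changed: B runs eleven staged whole-string str.replace passes, one per target letter, instead of A's single char-by-char scan with a membership test and string-concatenation accumulator.
import Mathlib
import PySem

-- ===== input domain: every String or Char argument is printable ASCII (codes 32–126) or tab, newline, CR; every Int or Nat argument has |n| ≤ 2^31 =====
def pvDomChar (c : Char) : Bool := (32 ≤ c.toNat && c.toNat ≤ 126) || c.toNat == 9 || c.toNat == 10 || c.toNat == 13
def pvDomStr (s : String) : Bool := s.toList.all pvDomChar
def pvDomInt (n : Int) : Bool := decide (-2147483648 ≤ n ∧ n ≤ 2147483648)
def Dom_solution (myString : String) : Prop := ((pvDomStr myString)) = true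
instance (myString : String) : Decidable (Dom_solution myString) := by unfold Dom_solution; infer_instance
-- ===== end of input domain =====

-- B replaces A's single char-by-char accumulator scan with eleven staged whole-string
-- str.replace passes (one per letter 'a'..'k'); the return values agree everywhere.

-- ===== PORT A =====
-- 'string in "abcdefghijk"' with 'string' a single char = membership of that char in the needle's characters
def solution (myString : String) : String :=
  String.ofList <|
    myString.toList.foldl
      (fun answer c =>
        if ("abcdefghijk".toList).contains c then answer ++ ['l'] else answer ++ [c])
      []

-- ===== PORT B =====
-- for c in 'abcdefghijk': myString = myString.replace(c, 'l')
def solution_alt (myString : String) : String :=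
  "abcdefghijk".toList.foldl
    (fun s c => PySem.Str.replace s (String.singleton c) "l") myString

-- ===== PRECONDITION & SPEC =====
def Spec_solution (myString : String) (out : String) : Prop := out = solution_alt myString
instance (myString : String) (out : String) : Decidable (Spec_solution myString out) := by unfold Spec_solution; infer_instance

-- ===== CLAIM (what is proved, stated in full; the proofs are below) =====
def Claim_equal_solution : Prop := ∀ (myString : String), Dom_solution myString → Spec_solution myString (solution myString)

-- ===== LEMMAS AND PROOFS =====

-- single-character substitution
def pvSubst (k c : Char) : Char := if c = k then 'l' else c

lemma go_single (k : Char) :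
    ∀ (fuel : Nat) (l acc : List Char), l.length ≤ fuel →
      PySem.Chars.replace.go [k] ['l'] fuel l acc = acc.reverse ++ l.map (pvSubst k) := by
  intro fuel
  induction fuel with
  | zero =>
      intro l acc h
      have : l = [] := List.eq_nil_of_length_eq_zero (Nat.le_zero.mp h)
      subst this; simp [PySem.Chars.replace.go]
  | succ n ih =>
      intro l acc h
      cases l with
      | nil => simp [PySem.Chars.replace.go]
      | cons c t =>
          rw [PySem.Chars.replace.go]
          by_cases hk : c = k
          · subst hk
            simp [List.isPrefixOf, pvSubst, ih t _ (Nat.le_of_succ_le_succ h)]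
          · have : List.isPrefixOf [k] (c :: t) = false := by
              simp [List.isPrefixOf]; exact fun e => (hk e.symm).elim
            simp [this, pvSubst, hk, ih t _ (Nat.le_of_succ_le_succ h)]

lemma replace_single (k : Char) (s : List Char) :
    PySem.Chars.replace s [k] ['l'] = s.map (pvSubst k) := by
  rw [PySem.Chars.replace]
  simp [go_single k s.length s [] (le_refl _)]

-- the staged passes compose into one pointwise substitution, since 'l' is never a key
lemma foldl_replace (ks : List Char) (hl : 'l' ∉ ks) :
    ∀ s : List Char,
      ks.foldl (fun s c => PySem.Chars.replace s [c] ['l']) s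
        = s.map (fun c => if ks.contains c then 'l' else c) := by
  induction ks with
  | nil => intro s; simp
  | cons k t ih =>
      intro s
      have hlt : 'l' ∉ t := fun h => hl (List.mem_cons_of_mem _ h)
      have hlk : 'l' ≠ k := fun h => hl (h ▸ List.mem_cons_self ..)
      rw [List.foldl_cons, replace_single, ih hlt, List.map_map]
      apply List.map_congr_left
      intro c _
      simp only [Function.comp, pvSubst]
      by_cases hck : c = k
      · subst hck; simp [hlt]
      · simp [hck]

-- A's accumulator loop is the same pointwise substitution
lemma foldl_eq_map (l : List Char) (acc : List Char) :
    l.foldl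
      (fun answer c =>
        if ("abcdefghijk".toList).contains c then answer ++ ['l'] else answer ++ [c])
      acc
    = acc ++ l.map (fun c => if ("abcdefghijk".toList).contains c then 'l' else c) := by
  induction l generalizing acc with
  | nil => simp
  | cons c l ih =>
      rw [List.map_cons, List.foldl_cons]
      split_ifs with h <;> rw [ih] <;> simp

lemma alt_toList (s : String) :
    (solution_alt s).toList
      = s.toList.map (fun c => if ("abcdefghijk".toList).contains c then 'l' else c) := by
  unfold solution_alt
  have : ∀ (ks : List Char) (t : String),
      (ks.foldl (fun s c => PySem.Str.replace s (String.singleton c) "l") t).toList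
        = ks.foldl (fun s c => PySem.Chars.replace s [c] ['l']) t.toList := by
    intro ks
    induction ks with
    | nil => intro t; rfl
    | cons k t2 ih =>
        intro t
        rw [List.foldl_cons, List.foldl_cons, ih, PySem.Str.toList_replace]
        simp [String.singleton]
  rw [this, foldl_replace _ (by decide)]

-- ===== VERDICT (by name: the statement is the Claim_ definition above) =====
theorem solution_spec : Claim_equal_solution := by
  intro s _
  unfold Spec_solution solution
  apply String.ext  -- equal toLists
  rw [String.toList_ofList, foldl_eq_map, alt_toList]
  simp
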